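-- pv_equiv track=rewrite | github.com/negativexq/Python-interview | 2.py | solution
-- ===== SOURCE A (Python) =====
-- def solution(max_value):
--   # Fibonacci sayılarının ilk iki değeri
--   a, b = 0, 1
--   # Toplamı tutan değişken
--   fibonacci_sum = 0
--
--   # İlerleme koşulu
--   while b < max_value:
--     # Eğer sayı 3'e bölünürse, toplama ekle
--     if b % 3 == 0:
--       fibonacci_sum += b
--     # İlerleme
--     a, b = b, a + b
--
--   return fibonacci_sum
-- ===== SOURCE B (Python) =====
-- def solution(max_value):
--     # The Fibonacci multiples of 3 (3, 21, 144, 987, ...) satisfy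
--     # G(n) = 7*G(n-1) - G(n-2); sum them directly, no divisibility test.
--     total = 0
--     c, d = 3, 21
--     while c < max_value:
--         total += c
--         c, d = d, 7 * d - c
--     return total
-- ===== Notes on version B (the rewrite author's own statement) =====
-- stated objective: alternative
-- what changed: Instead of generating every Fibonacci number and testing b % 3 == 0, B iterates the recurrence G(n) = 7*G(n-1) - G(n-2) seeded at (3, 21), which produces exactly the Fibonacci multiples of 3, summing each term below max_value with no divisibility test.
import Mathlib
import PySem

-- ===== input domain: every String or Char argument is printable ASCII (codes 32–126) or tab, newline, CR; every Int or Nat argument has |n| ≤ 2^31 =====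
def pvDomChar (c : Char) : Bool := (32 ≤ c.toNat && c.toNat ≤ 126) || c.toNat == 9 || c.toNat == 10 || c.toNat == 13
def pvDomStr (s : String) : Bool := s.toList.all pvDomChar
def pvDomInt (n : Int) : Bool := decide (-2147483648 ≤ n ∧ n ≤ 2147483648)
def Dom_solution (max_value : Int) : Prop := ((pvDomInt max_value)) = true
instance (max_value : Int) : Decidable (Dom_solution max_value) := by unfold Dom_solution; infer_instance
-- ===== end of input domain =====

-- B replaces the Fibonacci generator + divisibility test by the recurrence
-- G(n) = 7*G(n-1) - G(n-2) over the multiples of 3 themselves (objective: alternative).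

-- ===== PORT A =====
-- A's while loop as structural recursion on the state (a, b, fibonacci_sum);
-- the invariant hypotheses 0 ≤ a, 1 ≤ b (true of the initial state 0, 1) only
-- justify termination, the computation is step-for-step A's loop body.
def solLoop (max_value a b s : Int) (ha : 0 ≤ a) (hb : 1 ≤ b) : Int :=
  if h : b < max_value then
    solLoop max_value b (a + b) (if PySem.Int.mod b 3 = 0 then s + b else s)
      (by omega) (by omega)
  else s
termination_by ((max_value - b).toNat, (1 - a).toNat)
decreasing_by
  by_cases h1 : a = 0
  · subst h1
    simp only [zero_add]
    apply Prod.Lex.right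
    omega
  · apply Prod.Lex.left
    omega

def solution (max_value : Int) : Int := solLoop max_value 0 1 0 (by omega) (by omega)

-- ===== PORT B =====
-- B's while loop over (c, d, total); the invariant 1 ≤ c < d (true of the seed
-- 3, 21) justifies termination.
def altLoop (max_value c d s : Int) (hc : 1 ≤ c) (hcd : c < d) : Int :=
  if h : c < max_value then
    altLoop max_value d (7 * d - c) (s + c) (by omega) (by omega)
  else s
termination_by (max_value - c).toNat
decreasing_by omega

def solution_alt (max_value : Int) : Int := altLoop max_value 3 21 0 (by omega) (by omega)

-- ===== PRECONDITION & SPEC =====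
def Spec_solution (max_value : Int) (out : Int) : Prop := out = solution_alt max_value
instance (max_value : Int) (out : Int) : Decidable (Spec_solution max_value out) := by unfold Spec_solution; infer_instance

-- ===== CLAIM (what is proved, stated in full; the proofs are below) =====
def Claim_equal_solution : Prop := ∀ (max_value : Int), Dom_solution max_value → Spec_solution max_value (solution max_value)

-- ===== LEMMAS AND PROOFS =====

theorem solLoop_step (max_value a b s : Int) (ha : 0 ≤ a) (hb : 1 ≤ b)
    (ha' : 0 ≤ b) (hb' : 1 ≤ a + b) :
    solLoop max_value a b s ha hb =
      if b < max_value then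
        solLoop max_value b (a + b) (if PySem.Int.mod b 3 = 0 then s + b else s) ha' hb'
      else s := by
  rw [solLoop.eq_def]
  split <;> rfl

theorem altLoop_step (max_value c d s : Int) (hc : 1 ≤ c) (hcd : c < d)
    (hc' : 1 ≤ d) (hcd' : d < 7 * d - c) :
    altLoop max_value c d s hc hcd =
      if c < max_value then altLoop max_value d (7 * d - c) (s + c) hc' hcd'
      else s := by
  rw [altLoop.eq_def]
  split <;> rfl

theorem mod3_eq (b : Int) : (PySem.Int.mod b 3 = 0) ↔ (3 ∣ b) :=
  PySem.Int.mod_eq_zero_iff_dvd b 3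

-- Core invariant: from an A-state (a, b) with 1 ≤ a < b, 3 ∣ b, ¬ 3 ∣ a, the rest
-- of A's loop sums exactly what B's loop sums from (b, 3a+5b).
theorem loop_eq (n : ℕ) : ∀ (max_value a b s : Int) (_ha0 : 1 ≤ a) (_hab : a < b)
    (_hdb : 3 ∣ b) (_hda : ¬ 3 ∣ a) (_hn : (max_value - b).toNat ≤ n)
    (h1 : 0 ≤ a) (h2 : 1 ≤ b) (h3 : 1 ≤ b) (h4 : b < 3 * a + 5 * b),
    solLoop max_value a b s h1 h2 = altLoop max_value b (3 * a + 5 * b) s h3 h4 := by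
  induction n with
  | zero =>
    intro max_value a b s ha0 hab hdb hda hn h1 h2 h3 h4
    have hnb : ¬ b < max_value := by omega
    rw [solLoop.eq_def, altLoop.eq_def]
    simp [hnb]
  | succ n ih =>
    intro max_value a b s ha0 hab hdb hda hn h1 h2 h3 h4
    by_cases hlt : b < max_value
    · -- unfold B once
      rw [altLoop_step max_value b (3 * a + 5 * b) s h3 h4 (by omega) (by omega)]
      simp only [if_pos hlt]
      -- unfold A four times; the three intermediate b's are not divisible by 3
      have d1 : 3 ∣ b := hdb
      have nd2 : ¬ 3 ∣ (a + b) := by omega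
      have nd3 : ¬ 3 ∣ (b + (a + b)) := by omega
      have nd4 : ¬ 3 ∣ ((a + b) + (b + (a + b))) := by omega
      rw [solLoop_step max_value a b s h1 h2 (by omega) (by omega)]
      simp only [if_pos hlt, if_pos ((mod3_eq b).mpr d1)]
      rw [solLoop_step max_value b (a + b) (s + b) (by omega) (by omega) (by omega) (by omega)]
      by_cases g2 : a + b < max_value
      · simp only [if_pos g2, if_neg (fun h => nd2 ((mod3_eq _).mp h))]
        rw [solLoop_step max_value (a + b) (b + (a + b)) (s + b) (by omega) (by omega) (by omega) (by omega)]
        by_cases g3 : b + (a + b) < max_value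
        · simp only [if_pos g3, if_neg (fun h => nd3 ((mod3_eq _).mp h))]
          rw [solLoop_step max_value (b + (a + b)) ((a + b) + (b + (a + b))) (s + b)
            (by omega) (by omega) (by omega) (by omega)]
          by_cases g4 : (a + b) + (b + (a + b)) < max_value
          · simp only [if_pos g4, if_neg (fun h => nd4 ((mod3_eq _).mp h))]
            have key := ih max_value ((a + b) + (b + (a + b)))
              ((b + (a + b)) + ((a + b) + (b + (a + b)))) (s + b)
              (by omega) (by omega) (by omega) (by omega) (by omega)
              (by omega) (by omega) (by omega) (by omega)
            rw [key]
            have e1 : (b + (a + b)) + ((a + b) + (b + (a + b))) = 3 * a + 5 * b := by ring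
            have e2 : 3 * ((a + b) + (b + (a + b))) + 5 * ((b + (a + b)) + ((a + b) + (b + (a + b)))) =
                7 * (3 * a + 5 * b) - b := by ring
            congr 1
          · -- A exits here; B's next guard 3a+5b < max_value also fails
            simp only [if_neg g4]
            rw [altLoop.eq_def]
            have : ¬ 3 * a + 5 * b < max_value := by omega
            simp [this]
        · simp only [if_neg g3]
          rw [altLoop.eq_def]
          have : ¬ 3 * a + 5 * b < max_value := by omega
          simp [this]
      · simp only [if_neg g2]
        rw [altLoop.eq_def]
        have : ¬ 3 * a + 5 * b < max_value := by omega
        simp [this]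
    · rw [solLoop.eq_def, altLoop.eq_def]
      simp [hlt]

-- ===== VERDICT (by name: the statement is the Claim_ definition above) =====
theorem solution_spec : Claim_equal_solution := by
  intro max_value _
  show solution max_value = solution_alt max_value
  unfold solution solution_alt
  by_cases h1 : (1 : Int) < max_value
  · rw [solLoop_step max_value 0 1 0 (by omega) (by omega) (by omega) (by omega)]
    have nd1 : ¬ PySem.Int.mod 1 3 = 0 := by decide
    simp only [if_pos h1, if_neg nd1]
    rw [solLoop_step max_value 1 (0 + 1) 0 (by omega) (by omega) (by omega) (by omega)]
    have h1' : (0 + 1 : Int) < max_value := by omega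
    have nd1' : ¬ PySem.Int.mod (0 + 1) 3 = 0 := by decide
    simp only [if_pos h1', if_neg nd1']
    by_cases h2 : (1 + (0 + 1) : Int) < max_value
    · rw [solLoop_step max_value (0 + 1) (1 + (0 + 1)) 0 (by omega) (by omega) (by omega) (by omega)]
      have nd2 : ¬ PySem.Int.mod (1 + (0 + 1)) 3 = 0 := by decide
      simp only [if_pos h2, if_neg nd2]
      have key := loop_eq (max_value - 3).toNat max_value (1 + (0 + 1))
        ((0 + 1) + (1 + (0 + 1))) 0 (by omega) (by omega) (by decide) (by decide)
        (by omega) (by omega) (by omega) (by omega) (by omega)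
      rw [key]
      congr 1
    · rw [solLoop.eq_def, altLoop.eq_def]
      have h3 : ¬ (3 : Int) < max_value := by omega
      simp [h3]
      intro hh
      exact absurd hh (by omega)
  · rw [solLoop.eq_def, altLoop.eq_def]
    have : ¬ (1 : Int) < max_value := h1
    have h3 : ¬ (3 : Int) < max_value := by omega
    simp [this, h3]
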